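-- pv_equiv track=rewrite | github.com/AnyDSL/impala | test/run.py | is_broken
-- ===== SOURCE A (Python) =====
-- def is_broken(X):
--     for x in X:
--         if (x == 'broken'):
--             res = []
--             for y in X:
--                 if y != x:
--                     res.append(y)
--             return True, res
--     return False, X
-- ===== SOURCE B (Python) =====
-- def is_broken(X):
--     found = False
--     res = []
--     for y in X:
--         if y == 'broken':
--             found = True
--         else:
--             res.append(y)
--     if found:
--         return True, res
--     return False, X
-- ===== Notes on version B (the rewrite author's own statement) =====
-- stated objective: alternative
-- what changed: Replaces A's search-then-nested-filter (a scan that, on finding 'broken', starts a second full loop to rebuild the list) by one fused pass maintaining a (found, res) accumulator pair, with no second scan and no early return.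
import Mathlib
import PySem

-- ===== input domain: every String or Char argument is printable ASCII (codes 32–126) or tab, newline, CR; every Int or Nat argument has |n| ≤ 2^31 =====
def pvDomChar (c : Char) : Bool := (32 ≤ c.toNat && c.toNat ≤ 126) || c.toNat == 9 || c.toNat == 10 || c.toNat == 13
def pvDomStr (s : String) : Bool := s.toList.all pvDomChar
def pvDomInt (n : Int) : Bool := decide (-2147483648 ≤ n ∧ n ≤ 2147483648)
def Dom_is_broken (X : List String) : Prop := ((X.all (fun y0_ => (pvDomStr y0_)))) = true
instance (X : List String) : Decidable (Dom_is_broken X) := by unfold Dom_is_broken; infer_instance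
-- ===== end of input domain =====

-- B replaces A's search-then-nested-filter early return by one fused pass over a (found, res) accumulator pair (objective: alternative).

-- ===== PORT A =====
-- outer 'for x in X' loop; on hit, the inner 'for y in X' append loop builds res
def isBrokenGoA (X : List String) : List String → Bool × List String
  | [] => (false, X)
  | x :: rest =>
    if x == "broken" then
      (true, X.foldl (fun res y => if y != x then res ++ [y] else res) [])
    else isBrokenGoA X rest

def is_broken (X : List String) : Bool × List String := isBrokenGoA X X

-- ===== PORT B =====
-- single pass: state (found, res); 'broken' sets the flag, anything else is appended
def is_broken_alt (X : List String) : Bool × List String :=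
  let st := X.foldl
    (fun (st : Bool × List String) y =>
      if y == "broken" then (true, st.2) else (st.1, st.2 ++ [y])) (false, [])
  if st.1 then (true, st.2) else (false, X)

-- ===== PRECONDITION & SPEC =====
def Spec_is_broken (X : List String) (out : Bool × List String) : Prop := out = is_broken_alt X
instance (X : List String) (out : Bool × List String) : Decidable (Spec_is_broken X out) := by unfold Spec_is_broken; infer_instance

-- ===== CLAIM (what is proved, stated in full; the proofs are below) =====
def Claim_equal_is_broken : Prop := ∀ (X : List String), Dom_is_broken X → Spec_is_broken X (is_broken X)

-- ===== LEMMAS AND PROOFS =====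
theorem foldl_filter_aux (l acc : List String) :
    l.foldl (fun res y => if y != "broken" then res ++ [y] else res) acc
      = acc ++ l.filter (fun y => y != "broken") := by
  induction l generalizing acc with
  | nil => simp
  | cons x xs ih =>
    rw [List.foldl_cons, ih]
    by_cases hx : x = "broken" <;> simp [hx]

theorem isBrokenGoA_spec (X : List String) (l : List String) :
    isBrokenGoA X l =
      if "broken" ∈ l then (true, X.filter (fun y => y != "broken")) else (false, X) := by
  induction l with
  | nil => simp [isBrokenGoA]
  | cons x rest ih =>
    by_cases hx : x = "broken"
    · subst hx
      rw [show isBrokenGoA X ("broken" :: rest) = (true, List.foldl (fun res y => if y != "broken" then res ++ [y] else res) [] X) from rfl, foldl_filter_aux]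
      simp
    · simp [isBrokenGoA, hx, ih, Ne.symm hx]

theorem foldB_spec (l : List String) (b : Bool) (acc : List String) :
    l.foldl (fun (st : Bool × List String) y =>
        if y == "broken" then (true, st.2) else (st.1, st.2 ++ [y])) (b, acc)
      = (b || decide ("broken" ∈ l), acc ++ l.filter (fun y => y != "broken")) := by
  induction l generalizing b acc with
  | nil => simp
  | cons x xs ih =>
    rw [List.foldl_cons]
    by_cases hx : x = "broken"
    · subst hx
      simp only [beq_self_eq_true, if_true]
      rw [ih]; simp
    · have hb : (x == "broken") = false := by simp [hx]
      simp only [hb, Bool.false_eq_true, if_false]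
      rw [ih]
      simp [List.filter_cons, Ne.symm hx, hx]

-- ===== VERDICT (by name: the statement is the Claim_ definition above) =====
theorem is_broken_spec : Claim_equal_is_broken := by
  intro X _
  unfold Spec_is_broken is_broken is_broken_alt
  rw [isBrokenGoA_spec, foldB_spec]
  by_cases h : "broken" ∈ X <;> simp [h]
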